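-- pv_equiv track=rewrite | github.com/matiastesta/Zentral | app/sales/routes.py | _validate_ventas_historial_visible_columns
-- ===== SOURCE A (Python) =====
-- _VENTAS_HISTORIAL_ALLOWED_COLUMNS = {
--     'ticket',
--     'fecha',
--     'cliente',
--     'empleado',
--     'total',
--     'pago',
--     'tipo',
--     'productos',
--     'cantidad_items',
--     'descuento',
--     'recargo',
--     'regalo',
--     'margen_bruto',
--     'cmv',
--     'observaciones',
--     'cliente_direccion',
--     'cliente_email',
--     'cliente_telefono',
--     'cliente_cumple',
--     'cliente_clasificacion',
--     'cliente_saldo_cc',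
-- }
--
-- def _validate_ventas_historial_visible_columns(cols_in: list) -> tuple[list[str] | None, str | None]:
--     cols = cols_in if isinstance(cols_in, list) else []
--     out: list[str] = []
--     unknown: list[str] = []
--     for c in cols:
--         k = str(c or '').strip().lower()
--         if not k:
--             continue
--         if k not in _VENTAS_HISTORIAL_ALLOWED_COLUMNS:
--             unknown.append(k)
--             continue
--         if k not in out:
--             out.append(k)
--
--     if unknown:
--         return None, 'Columnas desconocidas.'
--     if len(out) < 1:
--         return None, 'Debe haber al menos 1 columna.'
--     if len(out) > 10:
--         return None, 'Máximo 10 columnas.'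
--     return out, None
-- ===== SOURCE B (Python) =====
-- _VENTAS_HISTORIAL_ALLOWED_COLUMNS = {
--     'ticket', 'fecha', 'cliente', 'empleado', 'total', 'pago', 'tipo',
--     'productos', 'cantidad_items', 'descuento', 'recargo', 'regalo',
--     'margen_bruto', 'cmv', 'observaciones', 'cliente_direccion',
--     'cliente_email', 'cliente_telefono', 'cliente_cumple',
--     'cliente_clasificacion', 'cliente_saldo_cc',
-- }
--
--
-- def _validate_ventas_historial_visible_columns(cols_in: list) -> tuple:
--     cols = cols_in if isinstance(cols_in, list) else []
--     # Normalize first; then sieve the worklist: take its next key, and when it is an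
--     # allowed one, erase every later copy of it from the worklist itself, so the output
--     # needs no membership test at all; an unknown key just sets a sticky flag.
--     # (The worklist is kept reversed so that taking the next key is an O(1) pop.)
--     pending = [k for k in (str(c or '').strip().lower() for c in reversed(cols)) if k]
--     out: list = []
--     unknown = False
--     while pending:
--         k = pending.pop()
--         if k in _VENTAS_HISTORIAL_ALLOWED_COLUMNS:
--             out.append(k)
--             pending = [x for x in pending if x != k]
--         else:
--             unknown = True
--
--     if unknown:
--         return None, 'Columnas desconocidas.'
--     if len(out) < 1:
--         return None, 'Debe haber al menos 1 columna.'
--     if len(out) > 10: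
--         return None, 'Máximo 10 columnas.'
--     return out, None
-- ===== Notes on version B (the rewrite author's own statement) =====
-- stated objective: alternative
-- what changed: Dedup by a self-filtering worklist: normalize everything first, then repeatedly pop the next key and, when it is allowed, erase its later copies from the worklist itself (so the output needs no membership test), with a sticky boolean flag for unknown keys, instead of A's single loop that normalizes on the fly, collects an unknown list and dedups by membership scans over the growing output.
import Mathlib
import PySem

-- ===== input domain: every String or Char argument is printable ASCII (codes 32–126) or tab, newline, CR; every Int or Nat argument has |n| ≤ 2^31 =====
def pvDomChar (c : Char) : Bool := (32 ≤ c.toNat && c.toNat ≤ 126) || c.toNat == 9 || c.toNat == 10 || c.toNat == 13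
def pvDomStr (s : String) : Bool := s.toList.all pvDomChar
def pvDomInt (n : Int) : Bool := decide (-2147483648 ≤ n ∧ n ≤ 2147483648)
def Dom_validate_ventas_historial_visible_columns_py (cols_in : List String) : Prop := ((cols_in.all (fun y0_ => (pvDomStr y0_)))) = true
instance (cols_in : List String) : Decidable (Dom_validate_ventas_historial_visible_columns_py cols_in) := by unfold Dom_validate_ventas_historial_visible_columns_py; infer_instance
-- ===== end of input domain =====

-- B replaces A's single interleaved loop (normalize, collect unknowns, dedup by membership
-- scan on the output) by a normalize-first pass and a self-filtering worklist with a boolean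
-- unknown flag (alternative decomposition, similar cost).

-- the module constant _VENTAS_HISTORIAL_ALLOWED_COLUMNS (a Python set of distinct literals; only membership is used)
def pvAllowed : List String :=
  ["ticket", "fecha", "cliente", "empleado", "total", "pago", "tipo",
   "productos", "cantidad_items", "descuento", "recargo", "regalo",
   "margen_bruto", "cmv", "observaciones", "cliente_direccion",
   "cliente_email", "cliente_telefono", "cliente_cumple",
   "cliente_clasificacion", "cliente_saldo_cc"]

-- str(c or '').strip().lower() ; on a string c, `c or ''` is c itself ('' stays '')
def pvNorm (c : String) : String := PySem.Str.lower (PySem.Str.strip c)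

-- ===== PORT A =====
-- the body of A's for-loop: k = str(c or '').strip().lower(); the three guarded branches in order
def pvStepA (acc : List String × List String) (c : String) : List String × List String :=
  let k := pvNorm c
  if k = "" then acc
  else if ¬ (pvAllowed.contains k) then (acc.1, acc.2 ++ [k])
  else if ¬ (acc.1.contains k) then (acc.1 ++ [k], acc.2)
  else acc

def validate_ventas_historial_visible_columns_py (cols_in : List String) : Option (List String) × Option String :=
  -- cols = cols_in (always a list here); the loop carries (out, unknown)
  let st := cols_in.foldl pvStepA ([], [])
  if st.2 ≠ [] then (none, some "Columnas desconocidas.")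
  else if st.1.length < 1 then (none, some "Debe haber al menos 1 columna.")
  else if st.1.length > 10 then (none, some "Máximo 10 columnas.")
  else (some st.1, none)

-- ===== PORT B =====
-- B's while-loop over the worklist: take the next key (Python keeps the worklist
-- reversed purely so the pop is O(1); the recursion consumes the keys in the same,
-- original order); an allowed key is appended to out and its later copies are erased
-- from the worklist itself; an unknown key sets the sticky flag.
def pvSift (pending : List String) (out : List String) (unknown : Bool) : List String × Bool :=
  match pending with
  | [] => (out, unknown)
  | k :: rest =>
    if pvAllowed.contains k then
      pvSift (rest.filter (fun x => x ≠ k)) (out ++ [k]) unknown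
    else
      pvSift rest out true
termination_by pending.length
decreasing_by
  · simp only [List.length_unattach, List.length_cons]
    exact Nat.lt_succ_of_le (Nat.le_trans (List.length_filter_le _ _) (by simp))
  · simp

def validate_ventas_historial_visible_columns_py_alt (cols_in : List String) : Option (List String) × Option String :=
  let pending := (cols_in.map pvNorm).filter (fun k => k ≠ "")
  let st := pvSift pending [] false
  if st.2 then (none, some "Columnas desconocidas.")
  else if st.1.length < 1 then (none, some "Debe haber al menos 1 columna.")
  else if st.1.length > 10 then (none, some "Máximo 10 columnas.")
  else (some st.1, none)

-- ===== PRECONDITION & SPEC =====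
def Spec_validate_ventas_historial_visible_columns_py (cols_in : List String) (out : Option (List String) × Option String) : Prop := out = validate_ventas_historial_visible_columns_py_alt cols_in
instance (cols_in : List String) (out : Option (List String) × Option String) : Decidable (Spec_validate_ventas_historial_visible_columns_py cols_in out) := by unfold Spec_validate_ventas_historial_visible_columns_py; infer_instance

-- ===== CLAIM (what is proved, stated in full; the proofs are below) =====
def Claim_equal_validate_ventas_historial_visible_columns_py : Prop := ∀ (cols_in : List String), Dom_validate_ventas_historial_visible_columns_py cols_in → Spec_validate_ventas_historial_visible_columns_py cols_in (validate_ventas_historial_visible_columns_py cols_in)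

-- ===== LEMMAS AND PROOFS =====

-- the normalized nonempty keys of the input (B's worklist)
def pvKeys (cols : List String) : List String := (cols.map pvNorm).filter (fun k => k ≠ "")
-- the allowed / not-allowed keys among them, in order
def pvGood (cols : List String) : List String := (pvKeys cols).filter (fun k => pvAllowed.contains k)
def pvBad (cols : List String) : List String := (pvKeys cols).filter (fun k => ¬ pvAllowed.contains k)

theorem pvKeys_cons_skip {c : String} (cs : List String) (hk : pvNorm c = "") :
    pvKeys (c :: cs) = pvKeys cs := by simp [pvKeys, hk]

theorem pvKeys_cons {c : String} (cs : List String) (hk : pvNorm c ≠ "") :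
    pvKeys (c :: cs) = pvNorm c :: pvKeys cs := by simp [pvKeys, hk]

theorem pvStepA_skip {c : String} (acc : List String × List String) (hk : pvNorm c = "") :
    pvStepA acc c = acc := by simp [pvStepA, hk]

theorem pvStepA_unknown {c : String} (acc : List String × List String) (hk : pvNorm c ≠ "")
    (ha : pvNorm c ∉ pvAllowed) :
    pvStepA acc c = (acc.1, acc.2 ++ [pvNorm c]) := by simp [pvStepA, hk, ha]

theorem pvStepA_dup {c : String} (acc : List String × List String) (hk : pvNorm c ≠ "")
    (ha : pvNorm c ∈ pvAllowed) (ho : pvNorm c ∈ acc.1) :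
    pvStepA acc c = acc := by simp [pvStepA, hk, ha, ho]

theorem pvStepA_new {c : String} (acc : List String × List String) (hk : pvNorm c ≠ "")
    (ha : pvNorm c ∈ pvAllowed) (ho : pvNorm c ∉ acc.1) :
    pvStepA acc c = (acc.1 ++ [pvNorm c], acc.2) := by simp [pvStepA, hk, ha, ho]

-- A's loop, from an arbitrary state: `out` accumulates a Set.update over the allowed keys,
-- `unknown` appends the not-allowed keys, in order.
theorem pvLoop_spec (cols : List String) (out unknown : List String) :
    cols.foldl pvStepA (out, unknown)
    = (PySem.Set.update out (pvGood cols), unknown ++ pvBad cols) := by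
  induction cols generalizing out unknown with
  | nil => simp [pvGood, pvBad, pvKeys, PySem.Set.update]
  | cons c cs ih =>
    rw [List.foldl_cons]
    by_cases hk : pvNorm c = ""
    · rw [pvStepA_skip _ hk]
      simp [pvGood, pvBad, pvKeys_cons_skip cs hk, ih]
    · by_cases ha : pvNorm c ∈ pvAllowed
      · by_cases ho : pvNorm c ∈ out
        · rw [pvStepA_dup _ hk ha ho, ih]
          simp [pvGood, pvBad, pvKeys_cons cs hk, ha, PySem.Set.update_cons,
                PySem.Set.add_of_mem ho]
        · rw [pvStepA_new _ hk ha ho, ih]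
          simp [pvGood, pvBad, pvKeys_cons cs hk, ha, PySem.Set.update_cons,
                PySem.Set.add_of_not_mem ho]
      · rw [pvStepA_unknown _ hk ha, ih]
        simp [pvGood, pvBad, pvKeys_cons cs hk, ha]

-- unfolding equations for B's loop
theorem pvSift_nil (out : List String) (unknown : Bool) :
    pvSift [] out unknown = (out, unknown) := by
  rw [pvSift]

theorem pvSift_cons (k : String) (rest out : List String) (unknown : Bool) :
    pvSift (k :: rest) out unknown
    = if pvAllowed.contains k then
        pvSift (rest.filter (fun x => x ≠ k)) (out ++ [k]) unknown
      else
        pvSift rest out true := by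
  rw [pvSift]

-- erasing later copies of an element already in the accumulator does not change Set.update
theorem pvFilter_update {k : String} (L acc : List String) (hk : k ∈ acc) :
    PySem.Set.update acc (L.filter (fun x => x ≠ k)) = PySem.Set.update acc L := by
  induction L generalizing acc with
  | nil => rfl
  | cons a L ih =>
    by_cases hak : a = k
    · subst hak
      rw [List.filter_cons, if_neg (by simp), PySem.Set.update_cons,
        PySem.Set.add_of_mem hk]
      exact ih acc hk
    · rw [List.filter_cons, if_pos (by simp [hak]), PySem.Set.update_cons,
        PySem.Set.update_cons]
      by_cases hma : a ∈ acc
      · rw [PySem.Set.add_of_mem hma]; exact ih acc hk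
      · rw [PySem.Set.add_of_not_mem hma]
        exact ih (acc ++ [a]) (by simp [hk])

-- erasing copies of a key the predicate rejects does not change `any`
theorem pvAny_filter {k : String} (L : List String) (p : String → Bool) (hp : p k = false) :
    (L.filter (fun x => x ≠ k)).any p = L.any p := by
  induction L with
  | nil => rfl
  | cons a L ih =>
    by_cases hak : a = k
    · subst hak
      rw [List.filter_cons, if_neg (by simp), ih, List.any_cons, hp]
      simp
    · rw [List.filter_cons, if_pos (by simp [hak]), List.any_cons, List.any_cons, ih]

-- B's sieve, run from a state whose output is disjoint from the worklist, computes
-- exactly A's loop result: out = ordered dedup of the allowed keys, flag = some bad key left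
theorem pvSift_spec (n : Nat) (pending out : List String) (unknown : Bool)
    (hn : pending.length ≤ n) (hdisj : ∀ x ∈ pending, x ∉ out) :
    pvSift pending out unknown
    = (PySem.Set.update out (pending.filter (fun k => pvAllowed.contains k)),
       unknown || pending.any (fun k => !pvAllowed.contains k)) := by
  induction n generalizing pending out unknown with
  | zero =>
    have : pending = [] := List.eq_nil_of_length_eq_zero (Nat.le_zero.mp hn)
    subst this
    rw [pvSift_nil]
    simp [PySem.Set.update]
  | succ n ih =>
    match pending with
    | [] =>
      rw [pvSift_nil]
      simp [PySem.Set.update]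
    | k :: rest =>
      rw [pvSift_cons]
      by_cases ha : pvAllowed.contains k
      · have hlen : (rest.filter (fun x => x ≠ k)).length ≤ n :=
          Nat.le_trans (List.length_filter_le _ _) (Nat.le_of_succ_le_succ hn)
        have hk : k ∉ out := hdisj k (by simp)
        have hdisj' : ∀ x ∈ rest.filter (fun x => x ≠ k), x ∉ out ++ [k] := by
          intro x hx
          have hxr := List.mem_of_mem_filter hx
          have hxk : x ≠ k := by simpa using List.of_mem_filter hx
          simp only [List.mem_append, List.mem_singleton]
          exact fun h => h.elim (hdisj x (by simp [hxr])) hxk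
        rw [if_pos ha, ih _ _ _ hlen hdisj', Prod.mk.injEq]
        refine ⟨?_, ?_⟩
        · -- out component
          rw [List.filter_comm, pvFilter_update _ (out ++ [k]) (by simp),
              List.filter_cons, if_pos (by simpa using ha), PySem.Set.update_cons,
              PySem.Set.add_of_not_mem hk]
        · -- flag component
          have hbad : (!pvAllowed.contains k) = false := by simpa using ha
          rw [pvAny_filter rest _ hbad, List.any_cons, hbad, Bool.false_or]
      · have hlen : rest.length ≤ n := Nat.le_of_succ_le_succ hn
        have hdisj' : ∀ x ∈ rest, x ∉ out := fun x hx => hdisj x (by simp [hx])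
        rw [if_neg ha, ih _ _ _ hlen hdisj', Prod.mk.injEq]
        refine ⟨?_, ?_⟩
        · rw [List.filter_cons, if_neg (by simpa using ha)]
        · have hc : (!pvAllowed.contains k) = true := by simpa using ha
          rw [List.any_cons, hc]
          simp

-- A's `unknown` list is nonempty exactly when B's flag fires
theorem pvBad_ne_iff (cols : List String) :
    pvBad cols ≠ [] ↔ (pvKeys cols).any (fun k => !pvAllowed.contains k) = true := by
  rw [pvBad, ← List.isEmpty_eq_false_iff, List.isEmpty_eq_false_iff_exists_mem]
  simp [List.any_eq_true, List.mem_filter]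

-- ===== VERDICT (by name: the statement is the Claim_ definition above) =====
theorem validate_ventas_historial_visible_columns_py_spec : Claim_equal_validate_ventas_historial_visible_columns_py := by
  intro cols_in _
  unfold Spec_validate_ventas_historial_visible_columns_py
  simp only [validate_ventas_historial_visible_columns_py,
    validate_ventas_historial_visible_columns_py_alt]
  rw [pvLoop_spec]
  rw [show (cols_in.map pvNorm).filter (fun k => k ≠ "") = pvKeys cols_in from rfl]
  rw [pvSift_spec (pvKeys cols_in).length (pvKeys cols_in) [] false (Nat.le_refl _)
        (fun x _ h => absurd h (List.not_mem_nil))]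
  rw [show (pvKeys cols_in).filter (fun k => pvAllowed.contains k) = pvGood cols_in from rfl]
  simp only [List.nil_append, Bool.false_or]
  by_cases hbad : pvBad cols_in = []
  · have hflag : ¬ ((pvKeys cols_in).any (fun k => !pvAllowed.contains k) = true) :=
      fun h => ((pvBad_ne_iff cols_in).mpr h) hbad
    rw [if_neg (fun h => h hbad), if_neg hflag]
  · have hflag := (pvBad_ne_iff cols_in).mp hbad
    rw [if_pos hbad, if_pos hflag]
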